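-- pv_equiv track=rewrite | github.com/ofekavidan/Intro-to-CS-HUJI-Python- | Exercise08/nonogram.py | row_variations_helper
-- ===== SOURCE A (Python) =====
-- def row_variations_helper(row, blocks, partial, index):
--     if index == len(row):
--         res = []
--         if sum(partial) == sum(blocks):
--             res.append(partial[:])
--         return res
--
--     solution_list = []
--
--     if row[index] == -1:
--         partial.append(1)
--
--         solution_list += row_variations_helper(row, blocks, partial, index + 1)
--         partial.pop()
--
--         partial.append(0)
--         solution_list += row_variations_helper(row, blocks, partial, index + 1)
--
--         partial.pop()
--
--     else:
--         if row[index] == 0: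
--             partial.append(0)
--             solution_list += row_variations_helper(row, blocks, partial, index + 1)
--             partial.pop()
--         else:
--             if row[index] == 1:
--                 partial.append(1)
--                 solution_list += row_variations_helper(row, blocks, partial, index + 1)
--                 partial.pop()
--
--     return solution_list
-- ===== SOURCE B (Python) =====
-- def row_variations_helper(row, blocks, partial, index):
--     # Branch-and-bound DFS: precompute suffix min/max possible ones counts and
--     # validity, then prune any subtree that cannot meet the remaining target.
--     cells = [row[i] for i in range(index, len(row))]
--     m = len(cells)
--     lo = [0] * (m + 1)   # forced ones in cells[j:]
--     hi = [0] * (m + 1)   # max possible ones in cells[j:]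
--     ok = [True] * (m + 1)  # all cells[j:] are in {-1, 0, 1}
--     for j in range(m - 1, -1, -1):
--         c = cells[j]
--         lo[j] = lo[j + 1] + (1 if c == 1 else 0)
--         hi[j] = hi[j + 1] + (1 if c == 1 or c == -1 else 0)
--         ok[j] = ok[j + 1] and c in (-1, 0, 1)
--     out = []
--
--     def dfs(j, need, chosen):
--         if not ok[j] or need < lo[j] or need > hi[j]:
--             return
--         if j == m:
--             out.append(partial + chosen)
--             return
--         c = cells[j]
--         if c != 0:
--             dfs(j + 1, need - 1, chosen + [1])
--         if c != 1:
--             dfs(j + 1, need, chosen + [0])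
--
--     dfs(0, sum(blocks) - sum(partial), [])
--     return out
-- ===== Notes on version B (the rewrite author's own statement) =====
-- stated objective: alternative
-- what changed: Replaced the plain exhaustive DFS over all fillings with a branch-and-bound DFS in the same visit order: suffix arrays of forced/possible ones counts and cell validity are precomputed once, and any subtree whose remaining ones target is unreachable, already exceeded, or contains an invalid cell is pruned immediately; it trades an O(k) precomputation pass for pruning of dead subtrees.
import Mathlib
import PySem

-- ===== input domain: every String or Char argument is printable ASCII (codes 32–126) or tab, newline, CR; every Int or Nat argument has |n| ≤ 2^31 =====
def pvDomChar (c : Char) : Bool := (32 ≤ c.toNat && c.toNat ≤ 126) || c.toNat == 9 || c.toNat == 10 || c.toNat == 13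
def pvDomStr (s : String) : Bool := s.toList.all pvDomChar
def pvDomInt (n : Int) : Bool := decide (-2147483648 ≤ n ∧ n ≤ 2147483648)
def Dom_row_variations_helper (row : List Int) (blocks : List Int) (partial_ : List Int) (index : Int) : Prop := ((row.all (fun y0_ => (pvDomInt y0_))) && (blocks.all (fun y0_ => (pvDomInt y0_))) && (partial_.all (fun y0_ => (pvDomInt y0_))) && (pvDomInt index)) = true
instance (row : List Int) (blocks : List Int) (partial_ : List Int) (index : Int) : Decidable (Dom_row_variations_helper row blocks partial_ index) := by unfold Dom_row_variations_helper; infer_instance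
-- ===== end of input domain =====

-- B replaces A's exhaustive DFS by a branch-and-bound DFS (same visit order) that
-- precomputes suffix feasibility bounds and prunes dead subtrees (objective: alternative).
-- A mutates `partial` during recursion but restores it before returning; only the return value is claimed.

-- ===== PORT A =====
def row_variations_helper (row : List Int) (blocks : List Int) (partial_ : List Int) (index : Int) : List (List Int) :=
  if index = (row.length : Int) then
    (if partial_.sum = blocks.sum then [partial_] else [])
  else
    match h : PySem.List.pyGet? row index with
    | none => []   -- Python raises IndexError here; excluded by Pre_
    | some v =>
      if v = -1 then
        row_variations_helper row blocks (partial_ ++ [1]) (index + 1)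
          ++ row_variations_helper row blocks (partial_ ++ [0]) (index + 1)
      else if v = 0 then
        row_variations_helper row blocks (partial_ ++ [0]) (index + 1)
      else if v = 1 then
        row_variations_helper row blocks (partial_ ++ [1]) (index + 1)
      else []
termination_by ((row.length : Int) - index).toNat
decreasing_by
  all_goals
    (have hnn : ¬ (PySem.List.pyGet? row index = none) := by simp [h]
     rw [PySem.List.pyGet?_eq_none_iff] at hnn
     have hb : -(row.length : Int) ≤ index ∧ index < row.length := by
       by_contra hc
       exact hnn (by simpa [PySem.Raise.InRange] using fun h1 h2 => hc ⟨h1, h2⟩)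
     omega)

-- ===== PORT B =====
-- suffix stats, back to front: (forced ones, max possible ones, all cells valid) for each suffix
def pvAltStats : List Int → List (Int × Int × Bool)
  | [] => [(0, 0, true)]
  | c :: rest =>
    match pvAltStats rest with
    | [] => []
    | (lo, hi, ok) :: t =>
        (lo + (if c = 1 then 1 else 0),
         hi + (if c = 1 ∨ c = -1 then 1 else 0),
         ok && decide (c = -1 ∨ c = 0 ∨ c = 1)) :: (lo, hi, ok) :: t

def pvAltDfs (partial_ : List Int) (cells : List Int) (stats : List (Int × Int × Bool)) (need : Int) (chosen : List Int) : List (List Int) :=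
  match cells, stats with
  | _, [] => []
  | [], (lo, hi, ok) :: _ =>
      if ok = false ∨ need < lo ∨ hi < need then [] else [partial_ ++ chosen]
  | c :: rest, (lo, hi, ok) :: srest =>
      if ok = false ∨ need < lo ∨ hi < need then []
      else
        (if c ≠ 0 then pvAltDfs partial_ rest srest (need - 1) (chosen ++ [1]) else [])
          ++ (if c ≠ 1 then pvAltDfs partial_ rest srest need (chosen ++ [0]) else [])

def row_variations_helper_alt (row : List Int) (blocks : List Int) (partial_ : List Int) (index : Int) : List (List Int) :=
  -- cells = [row[i] for i in range(index, len(row))]; pyGetD's default is never used on Pre_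
  let cells := (PySem.List.pyRange index (row.length : Int) 1).map (fun i => PySem.List.pyGetD row i 0)
  pvAltDfs partial_ cells (pvAltStats cells) (blocks.sum - partial_.sum) []

-- ===== PRECONDITION & SPEC =====
-- Pre_ excludes exactly the inputs on which A raises IndexError (row[index] out of range,
-- recalling Python's negative-index wraparound which A's recursion does reach).
def Pre_row_variations_helper (row : List Int) (blocks : List Int) (partial_ : List Int) (index : Int) : Prop :=
  -(row.length : Int) ≤ index ∧ index ≤ (row.length : Int)
instance (row : List Int) (blocks : List Int) (partial_ : List Int) (index : Int) : Decidable (Pre_row_variations_helper row blocks partial_ index) := by unfold Pre_row_variations_helper; infer_instance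

def pvWitness_row_variations_helper : List Int × List Int × List Int × Int := ([-1, 0, -1], [1], [], 0)

def Spec_row_variations_helper (row : List Int) (blocks : List Int) (partial_ : List Int) (index : Int) (out : List (List Int)) : Prop := out = row_variations_helper_alt row blocks partial_ index
instance (row : List Int) (blocks : List Int) (partial_ : List Int) (index : Int) (out : List (List Int)) : Decidable (Spec_row_variations_helper row blocks partial_ index out) := by unfold Spec_row_variations_helper; infer_instance

-- ===== CLAIM (what is proved, stated in full; the proofs are below) =====
def Claim_equal_row_variations_helper : Prop := ∀ (row : List Int) (blocks : List Int) (partial_ : List Int) (index : Int), Dom_row_variations_helper row blocks partial_ index → Pre_row_variations_helper row blocks partial_ index → Spec_row_variations_helper row blocks partial_ index (row_variations_helper row blocks partial_ index)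

-- ===== LEMMAS AND PROOFS =====

-- A's recursion re-expressed structurally over the list of remaining cells (proof device)
def pvACells (bs : Int) (p : List Int) : List Int → List (List Int)
  | [] => if p.sum = bs then [p] else []
  | c :: rest =>
    if c = -1 then pvACells bs (p ++ [1]) rest ++ pvACells bs (p ++ [0]) rest
    else if c = 0 then pvACells bs (p ++ [0]) rest
    else if c = 1 then pvACells bs (p ++ [1]) rest
    else []

def pvLo : List Int → Int
  | [] => 0
  | c :: r => pvLo r + (if c = 1 then 1 else 0)

def pvHi : List Int → Int
  | [] => 0
  | c :: r => pvHi r + (if c = 1 ∨ c = -1 then 1 else 0)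

def pvOk : List Int → Bool
  | [] => true
  | c :: r => pvOk r && decide (c = -1 ∨ c = 0 ∨ c = 1)

theorem pvAltStats_head (cells : List Int) :
    ∃ t, pvAltStats cells = (pvLo cells, pvHi cells, pvOk cells) :: t := by
  induction cells with
  | nil => exact ⟨[], rfl⟩
  | cons c r ih =>
    obtain ⟨t, ht⟩ := ih
    exact ⟨(pvLo r, pvHi r, pvOk r) :: t, by simp [pvAltStats, ht, pvLo, pvHi, pvOk]⟩

theorem pvAltStats_cons (c : Int) (r : List Int) :
    pvAltStats (c :: r) = (pvLo (c :: r), pvHi (c :: r), pvOk (c :: r)) :: pvAltStats r := by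
  obtain ⟨t, ht⟩ := pvAltStats_head r
  simp [pvAltStats, ht, pvLo, pvHi, pvOk]

theorem pvACells_empty (bs : Int) (cells : List Int) : ∀ (p : List Int),
    (pvOk cells = false ∨ bs - p.sum < pvLo cells ∨ pvHi cells < bs - p.sum) →
    pvACells bs p cells = [] := by
  induction cells with
  | nil =>
    intro p h
    simp only [pvOk, pvLo, pvHi] at h
    have hne : p.sum ≠ bs := by
      rcases h with h | h | h
      · exact absurd h (by simp)
      · omega
      · omega
    simp [pvACells, hne]
  | cons c r ih =>
    intro p h
    by_cases hc : c = -1 ∨ c = 0 ∨ c = 1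
    · rcases hc with hc | hc | hc <;> subst hc
      · -- c = -1: both branches are empty
        have hLo : pvLo (-1 :: r) = pvLo r := by norm_num [pvLo]
        have hHi : pvHi (-1 :: r) = pvHi r + 1 := by norm_num [pvHi]
        have hOk : pvOk (-1 :: r) = pvOk r := by norm_num [pvOk]
        rw [hOk, hLo, hHi] at h
        have e1 : pvACells bs (p ++ [(1 : Int)]) r = [] := by
          apply ih
          simp only [List.sum_append, List.sum_cons, List.sum_nil]
          rcases h with h | h | h
          · exact Or.inl h
          · right; left; omega
          · right; right; omega
        have e0 : pvACells bs (p ++ [(0 : Int)]) r = [] := by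
          apply ih
          simp only [List.sum_append, List.sum_cons, List.sum_nil]
          rcases h with h | h | h
          · exact Or.inl h
          · right; left; omega
          · right; right; omega
        simp [pvACells, e1, e0]
      · -- c = 0
        have hLo : pvLo (0 :: r) = pvLo r := by norm_num [pvLo]
        have hHi : pvHi (0 :: r) = pvHi r := by norm_num [pvHi]
        have hOk : pvOk (0 :: r) = pvOk r := by norm_num [pvOk]
        rw [hOk, hLo, hHi] at h
        have e0 : pvACells bs (p ++ [(0 : Int)]) r = [] := by
          apply ih
          simp only [List.sum_append, List.sum_cons, List.sum_nil]
          rcases h with h | h | h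
          · exact Or.inl h
          · right; left; omega
          · right; right; omega
        simp [pvACells, e0]
      · -- c = 1
        have hLo : pvLo (1 :: r) = pvLo r + 1 := by norm_num [pvLo]
        have hHi : pvHi (1 :: r) = pvHi r + 1 := by norm_num [pvHi]
        have hOk : pvOk (1 :: r) = pvOk r := by norm_num [pvOk]
        rw [hOk, hLo, hHi] at h
        have e1 : pvACells bs (p ++ [(1 : Int)]) r = [] := by
          apply ih
          simp only [List.sum_append, List.sum_cons, List.sum_nil]
          rcases h with h | h | h
          · exact Or.inl h
          · right; left; omega
          · right; right; omega
        simp [pvACells, e1]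
    · push_neg at hc
      obtain ⟨e1, e2, e3⟩ := hc
      simp [pvACells, e1, e2, e3]

theorem pvACells_eq_dfs (bs : Int) (p0 : List Int) (cells : List Int) : ∀ (chosen : List Int),
    pvACells bs (p0 ++ chosen) cells
      = pvAltDfs p0 cells (pvAltStats cells) (bs - p0.sum - chosen.sum) chosen := by
  induction cells with
  | nil =>
    intro chosen
    simp only [pvACells, pvAltDfs, pvAltStats, List.sum_append]
    by_cases hs : p0.sum + chosen.sum = bs
    · have hn : ¬((true = false) ∨ bs - p0.sum - chosen.sum < 0 ∨ (0:Int) < bs - p0.sum - chosen.sum) := by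
        rintro (h | h | h)
        · exact absurd h (by simp)
        · omega
        · omega
      rw [if_pos hs, if_neg hn]
    · rw [if_neg hs, if_pos (Or.inr (by omega : bs - p0.sum - chosen.sum < 0 ∨ (0:Int) < bs - p0.sum - chosen.sum))]
  | cons c r ih =>
    intro chosen
    rw [pvAltStats_cons]
    simp only [pvAltDfs]
    by_cases hP : (pvOk (c :: r) = false ∨ bs - p0.sum - chosen.sum < pvLo (c :: r) ∨ pvHi (c :: r) < bs - p0.sum - chosen.sum)
    · rw [if_pos hP]
      apply pvACells_empty
      simp only [List.sum_append]
      rcases hP with hP | hP | hP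
      · exact Or.inl hP
      · right; left; omega
      · right; right; omega
    · rw [if_neg hP]
      have hokt : pvOk (c :: r) = true := by
        cases hx : pvOk (c :: r)
        · exact absurd (Or.inl hx) hP
        · rfl
      have hokc : c = -1 ∨ c = 0 ∨ c = 1 := by
        have h := hokt
        simp only [pvOk, Bool.and_eq_true, decide_eq_true_eq] at h
        exact h.2
      have e1 : pvACells bs (p0 ++ (chosen ++ [(1 : Int)])) r
          = pvAltDfs p0 r (pvAltStats r) (bs - p0.sum - chosen.sum - 1) (chosen ++ [1]) := by
        have h' := ih (chosen ++ [(1 : Int)])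
        simp only [List.sum_append, List.sum_cons, List.sum_nil, add_zero] at h'
        rw [show bs - p0.sum - chosen.sum - 1 = bs - p0.sum - (chosen.sum + 1) by ring]
        exact h'
      have e0 : pvACells bs (p0 ++ (chosen ++ [(0 : Int)])) r
          = pvAltDfs p0 r (pvAltStats r) (bs - p0.sum - chosen.sum) (chosen ++ [0]) := by
        have h' := ih (chosen ++ [(0 : Int)])
        simp only [List.sum_append, List.sum_cons, List.sum_nil, add_zero] at h'
        exact h'
      rcases hokc with hc | hc | hc <;> subst hc <;>
        simp [pvACells, List.append_assoc, e1, e0]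

theorem pvBridgeA (row blocks : List Int) (k : Nat) : ∀ (p : List Int) (index : Int),
    ((row.length : Int) - index).toNat = k →
    -(row.length : Int) ≤ index → index ≤ (row.length : Int) →
    row_variations_helper row blocks p index
      = pvACells blocks.sum p
          ((PySem.List.pyRange index (row.length : Int) 1).map (fun i => PySem.List.pyGetD row i 0)) := by
  induction k with
  | zero =>
    intro p index hk h1 h2
    have hin : index = (row.length : Int) := by omega
    subst hin
    rw [row_variations_helper]
    simp [PySem.List.pyRange_one_eq_nil (le_refl _), pvACells]
  | succ k ih =>
    intro p index hk h1 h2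
    have hlt : index < (row.length : Int) := by omega
    have hne : index ≠ (row.length : Int) := by omega
    have hsome : ∃ v, PySem.List.pyGet? row index = some v := by
      cases hg : PySem.List.pyGet? row index with
      | none =>
        rw [PySem.List.pyGet?_eq_none_iff] at hg
        exact absurd (by exact ⟨h1, hlt⟩ : PySem.Raise.InRange row.length index) hg
      | some v => exact ⟨v, rfl⟩
    obtain ⟨v, hv⟩ := hsome
    have hcells : (PySem.List.pyRange index (row.length : Int) 1).map (fun i => PySem.List.pyGetD row i 0)
        = v :: (PySem.List.pyRange (index + 1) (row.length : Int) 1).map (fun i => PySem.List.pyGetD row i 0) := by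
      rw [PySem.List.pyRange_one_cons hlt]
      simp [PySem.List.pyGetD, hv]
    have hrec := fun p' => ih p' (index + 1) (by omega) (by omega) (by omega)
    rw [row_variations_helper, if_neg hne]
    rw [hcells]
    have hm : (match h : PySem.List.pyGet? row index with
        | none => ([] : List (List Int))
        | some v =>
          if v = -1 then
            row_variations_helper row blocks (p ++ [1]) (index + 1)
              ++ row_variations_helper row blocks (p ++ [0]) (index + 1)
          else if v = 0 then
            row_variations_helper row blocks (p ++ [0]) (index + 1)
          else if v = 1 then
            row_variations_helper row blocks (p ++ [1]) (index + 1)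
          else [])
        = (if v = -1 then
            row_variations_helper row blocks (p ++ [1]) (index + 1)
              ++ row_variations_helper row blocks (p ++ [0]) (index + 1)
          else if v = 0 then
            row_variations_helper row blocks (p ++ [0]) (index + 1)
          else if v = 1 then
            row_variations_helper row blocks (p ++ [1]) (index + 1)
          else []) := by
      split
      · next heq => rw [heq] at hv; cases hv
      · next v' heq => rw [heq] at hv; cases hv; rfl
    rw [hm]
    simp only [pvACells]
    split_ifs <;> simp [hrec]
-- ===== VERDICT (by name: the statement is the Claim_ definition above) =====
theorem row_variations_helper_spec : Claim_equal_row_variations_helper := by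
  intro row blocks partial_ index _ hpre
  unfold Spec_row_variations_helper row_variations_helper_alt
  rw [pvBridgeA row blocks (((row.length : Int) - index).toNat) partial_ index rfl hpre.1 hpre.2]
  have := pvACells_eq_dfs blocks.sum partial_
    ((PySem.List.pyRange index (row.length : Int) 1).map (fun i => PySem.List.pyGetD row i 0)) []
  simpa using this
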